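-- pv_equiv track=rewrite | github.com/eliavw/mercs-v5 | queries/queries.py | desc_to_miss
-- ===== SOURCE A (Python) =====
-- def desc_to_miss(code, amount=1):
--     """
--     Change the first 'amount' of 0's to -1's
--     """
--
--     changes, i = 0, 0
--
--     while (i < len(code) and changes < amount):
--         if code[i] == 0:
--             code[i] = -1
--             changes += 1
--         else:
--             pass
--         i += 1
--     return code
-- ===== SOURCE B (Python) =====
-- def desc_to_miss(code, amount=1):
--     """
--     Change the first 'amount' of 0's to -1's
--     """
--     idx = [i for i, v in enumerate(code) if v == 0]
--     for i in idx[:max(amount, 0)]: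
--         code[i] = -1
--     return code
-- ===== Notes on version B (the rewrite author's own statement) =====
-- stated objective: alternative
-- what changed: Replaces the early-exit counter loop with one pass collecting all zero positions and a second pass setting the first max(amount,0) of them to -1.
import Mathlib
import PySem

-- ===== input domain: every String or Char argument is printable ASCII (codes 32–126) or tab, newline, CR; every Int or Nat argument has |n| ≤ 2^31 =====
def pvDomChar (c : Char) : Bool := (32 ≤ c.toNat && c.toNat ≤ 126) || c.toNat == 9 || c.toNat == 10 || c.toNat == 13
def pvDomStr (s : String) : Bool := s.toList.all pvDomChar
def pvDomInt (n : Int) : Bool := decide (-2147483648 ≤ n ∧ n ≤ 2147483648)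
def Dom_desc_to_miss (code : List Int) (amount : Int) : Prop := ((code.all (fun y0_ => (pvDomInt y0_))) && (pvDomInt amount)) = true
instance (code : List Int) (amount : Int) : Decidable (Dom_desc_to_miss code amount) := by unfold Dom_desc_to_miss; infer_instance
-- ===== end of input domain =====

-- B collects all zero positions in one pass, then sets the first max(amount,0) of them to -1 (alternative decomposition; same cost). Return-value equivalence only (both Pythons mutate `code` in place identically).


-- ===== PORT A =====
-- the while loop: walk the list carrying the `changes` counter; once changes ≥ amount the rest is untouched
def descLoopA (amount : Int) : List Int → Int → List Int
  | [], _ => []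
  | x :: xs, changes =>
    if changes < amount then
      if x == 0 then (-1) :: descLoopA amount xs (changes + 1)
      else x :: descLoopA amount xs changes
    else x :: xs

def desc_to_miss (code : List Int) (amount : Int) : List Int :=
  descLoopA amount code 0

-- ===== PORT B =====
-- idx = [i for i, v in enumerate(code) if v == 0]
def zeroIdxB (code : List Int) : List Int :=
  ((PySem.List.enumerate code).filter (fun p => p.2 == 0)).map (·.1)

-- for i in idx[:max(amount, 0)]: code[i] = -1
def desc_to_miss_alt (code : List Int) (amount : Int) : List Int :=
  ((zeroIdxB code).take (max amount 0).toNat).foldl (fun c i => c.set i.toNat (-1)) code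

-- ===== PRECONDITION & SPEC =====
def Spec_desc_to_miss (code : List Int) (amount : Int) (out : List Int) : Prop := out = desc_to_miss_alt code amount
instance (code : List Int) (amount : Int) (out : List Int) : Decidable (Spec_desc_to_miss code amount out) := by unfold Spec_desc_to_miss; infer_instance

-- ===== CLAIM (what is proved, stated in full; the proofs are below) =====
def Claim_equal_desc_to_miss : Prop := ∀ (code : List Int) (amount : Int), Dom_desc_to_miss code amount → Spec_desc_to_miss code amount (desc_to_miss code amount)

-- ===== LEMMAS AND PROOFS =====

-- common reference function: change the first k zeros
def descRef : List Int → Nat → List Int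
  | [], _ => []
  | x :: xs, k =>
    if k = 0 then x :: xs
    else if x = 0 then (-1) :: descRef xs (k - 1)
    else x :: descRef xs k

theorem descLoopA_eq_ref (amount : Int) (xs : List Int) (changes : Int) :
    descLoopA amount xs changes = descRef xs (amount - changes).toNat := by
  induction xs generalizing changes with
  | nil => simp [descLoopA, descRef]
  | cons x xs ih =>
    by_cases h : changes < amount
    · have hk : (amount - changes).toNat ≠ 0 := by omega
      by_cases hx : x = 0
      · have : (amount - (changes + 1)).toNat = (amount - changes).toNat - 1 := by omega
        simp [descLoopA, descRef, h, hx, hk, ih, this]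
      · simp [descLoopA, descRef, h, hx, hk, ih]
    · have hk : (amount - changes).toNat = 0 := by omega
      simp [descLoopA, descRef, h, hk]

def zfB (xs : List Int) (s : Int) : List Int :=
  ((PySem.List.enumerate xs s).filter (fun p => p.2 == 0)).map (·.1)

theorem zfB_cons (y : Int) (ys : List Int) (s : Int) :
    zfB (y :: ys) s = (if y = 0 then [s] else []) ++ zfB ys (s + 1) := by
  by_cases hy : y = 0 <;> simp [zfB, PySem.List.enumerate_cons, hy]

theorem zfB_shift (xs : List Int) (s : Int) :
    zfB xs (s + 1) = (zfB xs s).map (· + 1) := by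
  induction xs generalizing s with
  | nil => simp [zfB, PySem.List.enumerate]
  | cons y ys ih =>
    rw [zfB_cons, zfB_cons, show s + 1 + 1 = (s + 1) + 1 from rfl, ih (s + 1), List.map_append]
    by_cases hy : y = 0 <;> simp [hy]

theorem zeroIdxB_cons (x : Int) (xs : List Int) :
    zeroIdxB (x :: xs) =
      (if x = 0 then [(0 : Int)] else []) ++ (zeroIdxB xs).map (· + 1) := by
  have h1 : zeroIdxB (x :: xs) = zfB (x :: xs) 0 := rfl
  have h2 : zeroIdxB xs = zfB xs 0 := rfl
  rw [h1, h2, zfB_cons, show (0 : Int) + 1 = 0 + 1 from rfl, zfB_shift]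

-- every index in zeroIdxB is ≥ 0 and setting shifted indices skips the head
theorem zeroIdxB_nonneg (code : List Int) : ∀ i ∈ zeroIdxB code, 0 ≤ i := by
  induction code with
  | nil => simp [zeroIdxB, PySem.List.enumerate]
  | cons x xs ih =>
    intro i hi
    rw [zeroIdxB_cons] at hi
    rcases List.mem_append.mp hi with h | h
    · split at h <;> simp_all
    · obtain ⟨j, hj, rfl⟩ := List.mem_map.mp h
      have := ih j hj; omega

theorem descRef_zero (xs : List Int) : descRef xs 0 = xs := by
  cases xs <;> simp [descRef]

theorem foldl_set_shift (x : Int) (c : List Int) (is : List Int)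
    (hnn : ∀ i ∈ is, 0 ≤ i) :
    (is.map (· + 1)).foldl (fun c i => c.set i.toNat (-1)) (x :: c)
      = x :: is.foldl (fun c i => c.set i.toNat (-1)) c := by
  induction is generalizing c with
  | nil => simp
  | cons i is ih =>
    have hi : 0 ≤ i := hnn i (by simp)
    have : (i + 1).toNat = i.toNat + 1 := by omega
    simp only [List.map_cons, List.foldl_cons, this, List.set_cons_succ]
    exact ih _ (fun j hj => hnn j (by simp [hj]))

theorem foldl_take_zeroIdx (code : List Int) (k : Nat) :
    ((zeroIdxB code).take k).foldl (fun c i => c.set i.toNat (-1)) code = descRef code k := by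
  induction code generalizing k with
  | nil => simp [zeroIdxB, PySem.List.enumerate, descRef]
  | cons x xs ih =>
    rw [zeroIdxB_cons]
    by_cases hx : x = 0
    · rw [if_pos hx]
      cases k with
      | zero => simp [descRef, hx]
      | succ k' =>
        have hnn : ∀ i ∈ (zeroIdxB xs).take k', 0 ≤ i :=
          fun i hi => zeroIdxB_nonneg xs i (List.mem_of_mem_take hi)
        rw [List.cons_append, List.nil_append, List.take_succ_cons, List.foldl_cons,
          ← List.map_take, hx]
        have h0 : ((0 : Int)).toNat = 0 := rfl
        rw [h0, List.set_cons_zero, foldl_set_shift (-1) xs _ hnn, ih k']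
        simp [descRef]
    · rw [if_neg hx, List.nil_append, ← List.map_take]
      have hnn : ∀ i ∈ (zeroIdxB xs).take k, 0 ≤ i :=
        fun i hi => zeroIdxB_nonneg xs i (List.mem_of_mem_take hi)
      rw [foldl_set_shift x xs _ hnn, ih k]
      cases k with
      | zero => simp [descRef, descRef_zero]
      | succ k' => simp [descRef, hx]

-- ===== VERDICT (by name: the statement is the Claim_ definition above) =====
theorem desc_to_miss_spec : Claim_equal_desc_to_miss := by
  intro code amount _
  unfold Spec_desc_to_miss desc_to_miss desc_to_miss_alt
  rw [descLoopA_eq_ref, foldl_take_zeroIdx]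
  congr 1
  omega
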